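-- pv_equiv track=rewrite | github.com/Charlesliu89/Material-Fe-B | batch_enthalpy_plots.py | _format_multi_column
-- ===== SOURCE A (Python) =====
-- from typing import Dict, Iterable, List, Optional, Sequence, Tuple
--
-- def _format_multi_column(entries: Sequence[str], max_width: int) -> List[str]:
--     if not entries:
--         return ["None."]
--     column_width = max(len(entry) for entry in entries) + 2
--     columns = max(1, max_width // column_width)
--     rows = (len(entries) + columns - 1) // columns
--     lines: List[str] = []
--     for row in range(rows):
--         parts = []
--         for col in range(columns):
--             idx = row + col * rows
--             if idx >= len(entries):
--                 continue
--             parts.append(entries[idx].ljust(column_width))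
--         lines.append("".join(parts).rstrip())
--     return lines
-- ===== SOURCE B (Python) =====
-- from itertools import zip_longest
-- from typing import List, Sequence
--
--
-- def _format_multi_column(entries: Sequence[str], max_width: int) -> List[str]:
--     if not entries:
--         return ["None."]
--     column_width = max(len(entry) for entry in entries) + 2
--     columns = max(1, max_width // column_width)
--     rows = (len(entries) + columns - 1) // columns
--     cols = [entries[c * rows:(c + 1) * rows] for c in range(columns)]
--     return [
--         "".join(cell.ljust(column_width) for cell in row).rstrip()
--         for row in zip_longest(*cols, fillvalue="")
--     ]
-- ===== Notes on version B (the rewrite author's own statement) =====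
-- stated objective: simpler
-- what changed: Replaces the per-cell idx = row + col*rows index arithmetic and the in-range guard inside two nested loops with a data-level formulation: slice the entries into explicit columns and transpose them with itertools.zip_longest(fillvalue=''), so each output line is a plain join of one transposed row.
import Mathlib
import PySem

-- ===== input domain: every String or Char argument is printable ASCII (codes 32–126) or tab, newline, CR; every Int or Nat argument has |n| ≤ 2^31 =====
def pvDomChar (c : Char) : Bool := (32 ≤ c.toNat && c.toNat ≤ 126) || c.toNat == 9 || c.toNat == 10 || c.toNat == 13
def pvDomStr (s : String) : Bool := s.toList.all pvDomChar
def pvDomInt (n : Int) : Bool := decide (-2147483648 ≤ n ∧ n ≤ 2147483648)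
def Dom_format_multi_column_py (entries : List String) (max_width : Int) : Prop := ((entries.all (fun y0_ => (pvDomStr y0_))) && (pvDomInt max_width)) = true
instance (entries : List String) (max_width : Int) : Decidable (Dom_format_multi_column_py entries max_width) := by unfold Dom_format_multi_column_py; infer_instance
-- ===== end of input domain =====

-- B replaces A's per-cell idx = row + col*rows arithmetic with explicit column slices
-- transposed by a zip_longest(fillvalue='') (objective: simpler decomposition).

-- ===== PORT A =====
-- s.ljust(w): pad on the right with spaces to width w (exact: pads only when w > len(s))
def pvLjust (s : String) (w : Int) : String :=
  String.ofList (s.toList ++ List.replicate (w - (s.toList.length : Int)).toNat ' ')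

def format_multi_column_py (entries : List String) (max_width : Int) : List String :=
  if entries = [] then ["None."]
  else
    let column_width : Int :=
      (PySem.List.max? (entries.map (fun entry => PySem.Str.len entry)) (fun x => x)).getD 0 + 2
    let columns : Int := max 1 (PySem.Int.floordiv max_width column_width)
    let rows : Int := PySem.Int.floordiv ((entries.length : Int) + columns - 1) columns
    (PySem.List.pyRange 0 rows).foldl (fun lines row =>
      let parts : List String :=
        (PySem.List.pyRange 0 columns).foldl (fun parts col =>
          let idx := row + col * rows
          if (entries.length : Int) ≤ idx then parts
          else parts ++ [pvLjust (PySem.List.pyGetD entries idx "") column_width]) []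
      lines ++ [PySem.Str.rstrip (PySem.Str.join "" parts)]) []

-- ===== PORT B =====
-- itertools.zip_longest(*cols, fillvalue=fill): transpose, padding short columns with fill
def pvZipLongest {α : Type} (cols : List (List α)) (fill : α) : List (List α) :=
  (List.range ((cols.map List.length).foldl max 0)).map
    (fun r => cols.map (fun col => col.getD r fill))

def format_multi_column_py_alt (entries : List String) (max_width : Int) : List String :=
  if entries = [] then ["None."]
  else
    let column_width : Int :=
      (PySem.List.max? (entries.map (fun entry => PySem.Str.len entry)) (fun x => x)).getD 0 + 2
    let columns : Int := max 1 (PySem.Int.floordiv max_width column_width)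
    let rows : Int := PySem.Int.floordiv ((entries.length : Int) + columns - 1) columns
    let cols : List (List String) :=
      (PySem.List.pyRange 0 columns).map
        (fun c => PySem.List.slice entries (some (c * rows)) (some ((c + 1) * rows)))
    (pvZipLongest cols "").map
      (fun row => PySem.Str.rstrip (PySem.Str.join "" (row.map (fun cell => pvLjust cell column_width))))

-- ===== PRECONDITION & SPEC =====
def Spec_format_multi_column_py (entries : List String) (max_width : Int) (out : List String) : Prop := out = format_multi_column_py_alt entries max_width
instance (entries : List String) (max_width : Int) (out : List String) : Decidable (Spec_format_multi_column_py entries max_width out) := by unfold Spec_format_multi_column_py; infer_instance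

-- ===== CLAIM (what is proved, stated in full; the proofs are below) =====
def Claim_equal_format_multi_column_py : Prop := ∀ (entries : List String) (max_width : Int), Dom_format_multi_column_py entries max_width → Spec_format_multi_column_py entries max_width (format_multi_column_py entries max_width)

-- ===== LEMMAS AND PROOFS =====

lemma pv_join_empty (L : List (List Char)) : PySem.Chars.join [] L = L.flatten := by
  induction L with
  | nil => rfl
  | cons a t ih =>
    cases t with
    | nil => simp [PySem.Chars.join, List.intercalate]
    | cons b t2 =>
      simp only [PySem.Chars.join, List.intercalate, List.intersperse] at *
      simpa using ih

lemma pv_ljust_empty (cw : Int) : (pvLjust "" cw).toList = List.replicate cw.toNat ' ' := by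
  simp [pvLjust]

lemma pv_dropWhile_space (m : Nat) (x : List Char) :
    List.dropWhile PySem.Chars.isspace (List.replicate m ' ' ++ x) =
    List.dropWhile PySem.Chars.isspace x := by
  induction m with
  | zero => simp
  | succ k ih => simp [List.replicate_succ, ih, show PySem.Chars.isspace ' ' = true from rfl]

lemma pv_rstrip_spaces (a : List Char) (m : Nat) :
    PySem.Chars.rstrip (a ++ List.replicate m ' ') = PySem.Chars.rstrip a := by
  simp [PySem.Chars.rstrip, List.reverse_append, pv_dropWhile_space]

-- the skipped (out-of-range) cells form a suffix of blanks, so up to trailing spaces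
-- the per-row join over all columns equals the join over the in-range columns only
lemma pv_flatten_filter_spaces (G : Nat → List Char) (p : Nat → Prop) [DecidablePred p] (w : Nat)
    (hmono : ∀ i j : Nat, i ≤ j → p j → p i)
    (hsp : ∀ k, ¬ p k → G k = List.replicate w ' ') :
    ∀ C : Nat, ∃ m : Nat,
      ((List.range C).map G).flatten =
      (((List.range C).filter (fun k => decide (p k))).map G).flatten ++ List.replicate m ' ' := by
  intro C
  induction C with
  | zero => exact ⟨0, by simp⟩
  | succ C ih =>
    by_cases hp : p C
    · refine ⟨0, ?_⟩
      have hall : ∀ k ∈ List.range (C + 1), (fun k => decide (p k)) k = true := by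
        intro k hk
        simp only [List.mem_range] at hk
        simpa using hmono k C (by omega) hp
      rw [List.filter_eq_self.mpr hall]
      simp
    · obtain ⟨m, hm⟩ := ih
      refine ⟨m + w, ?_⟩
      rw [List.range_succ]
      simp only [List.map_append, List.filter_append, List.flatten_append, hm,
        List.map_cons, List.map_nil, List.flatten_cons, List.flatten_nil, List.append_nil]
      rw [hsp C hp]
      have hfC : List.filter (fun k => decide (p k)) [C] = [] := by simp [hp]
      rw [hfC]
      simp only [List.map_nil, List.flatten_nil, List.append_nil]
      rw [List.append_assoc, List.replicate_append_replicate]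

lemma pv_foldl_max_eq (l : List Nat) (R : Nat) (hmem : R ∈ l) (hub : ∀ x ∈ l, x ≤ R) :
    l.foldl max 0 = R := by
  apply le_antisymm
  · rcases PySem.List.foldl_max_mem l 0 with h | h
    · rw [h]; exact Nat.zero_le R
    · exact hub _ h
  · exact (PySem.List.le_foldl_max l 0).2 R hmem

-- one output line: A's guarded inner loop vs B's transposed row of column slices
lemma pv_row (entries : List String) (cw : Int) (C R : Nat)
    (r : Nat) (hr : r < R) :
    PySem.Str.rstrip (PySem.Str.join ""
      (((List.range C).map (fun k : Nat => (k : Int))).foldl (fun parts col =>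
        if (entries.length : Int) ≤ (r : Int) + col * (R : Int) then parts
        else parts ++ [pvLjust (PySem.List.pyGetD entries ((r : Int) + col * (R : Int)) "") cw]) []))
    = PySem.Str.rstrip (PySem.Str.join ""
        ((List.range C).map (fun k =>
          pvLjust ((List.take R (List.drop (k * R) entries)).getD r "") cw))) := by
  have hfun : (fun (parts : List String) (col : Int) =>
      if (entries.length : Int) ≤ (r : Int) + col * (R : Int) then parts
      else parts ++ [pvLjust (PySem.List.pyGetD entries ((r : Int) + col * (R : Int)) "") cw])
    = (fun parts col =>
      if (fun c : Int => decide ((r : Int) + c * (R : Int) < (entries.length : Int))) col = true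
      then parts ++ [pvLjust (PySem.List.pyGetD entries ((r : Int) + col * (R : Int)) "") cw]
      else parts) := by
    funext parts col
    by_cases hc : (r : Int) + col * (R : Int) < (entries.length : Int)
    · rw [if_neg (by omega), if_pos (by simpa using hc)]
    · rw [if_pos (by omega), if_neg (by simpa using hc)]
  rw [hfun, PySem.List.foldl_append_if, List.nil_append, List.filter_map, List.map_map]
  rw [← String.toList_inj, PySem.Str.toList_rstrip, PySem.Str.toList_rstrip,
      PySem.Str.toList_join, PySem.Str.toList_join,
      show ("" : String).toList = [] from rfl, pv_join_empty, pv_join_empty,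
      List.map_map, List.map_map]
  have hcell : ∀ k : Nat, (List.take R (List.drop (k * R) entries)).getD r ""
      = (entries[k * R + r]?).getD "" := by
    intro k
    rw [List.getD_eq_getElem?_getD, List.getElem?_take, if_pos hr, List.getElem?_drop]
  obtain ⟨m, hm⟩ := pv_flatten_filter_spaces
      (fun k => (pvLjust ((entries[k * R + r]?).getD "") cw).toList)
      (fun k => k * R + r < entries.length) cw.toNat
      (fun i j hij hj => by have := Nat.mul_le_mul_right R hij; omega)
      (fun k hk => by
        have hk' : ¬ (k * R + r < entries.length) := hk
        show (pvLjust ((entries[k * R + r]?).getD "") cw).toList = List.replicate cw.toNat ' '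
        rw [List.getElem?_eq_none (by omega)]
        simpa using pv_ljust_empty cw) C
  have hYG : (List.range C).map
        (fun k => (pvLjust ((List.take R (List.drop (k * R) entries)).getD r "") cw).toList)
      = (List.range C).map (fun k => (pvLjust ((entries[k * R + r]?).getD "") cw).toList) :=
    List.map_congr_left (fun k _ => by rw [hcell k])
  simp only [Function.comp_def]
  rw [hYG, hm, pv_rstrip_spaces]
  refine congrArg PySem.Chars.rstrip ?_
  have hq' : ∀ k ∈ List.range C,
      (decide ((r : Int) + (k : Int) * (R : Int) < (entries.length : Int)))
      = decide (k * R + r < entries.length) := by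
    intro k _
    have hidx : ((k * R + r : Nat) : Int) = (r : Int) + (k : Int) * (R : Int) := by
      push_cast; ring
    rw [decide_eq_decide, ← hidx]
    constructor <;> intro h <;> exact_mod_cast h
  rw [List.filter_congr hq']
  refine congrArg List.flatten ?_
  apply List.map_congr_left
  intro k hk
  have hkp : k * R + r < entries.length := by
    have := (List.mem_filter.mp hk).2
    simpa using this
  have hidx : (r : Int) + (k : Int) * (R : Int) = ((k * R + r : Nat) : Int) := by
    push_cast; ring
  rw [hidx, PySem.List.pyGetD_natCast, List.getD_eq_getElem?_getD]

-- core equivalence, with columns/rows already known as nonnegative integers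
lemma pv_core (entries : List String) (cw : Int) (C R : Nat)
    (hC : 1 ≤ C) (_hR : 1 ≤ R) (hRL : R ≤ entries.length) :
    (PySem.List.pyRange 0 (R : Int)).foldl (fun lines row =>
      lines ++ [PySem.Str.rstrip (PySem.Str.join ""
        ((PySem.List.pyRange 0 (C : Int)).foldl (fun parts col =>
          if (entries.length : Int) ≤ row + col * (R : Int) then parts
          else parts ++ [pvLjust (PySem.List.pyGetD entries (row + col * (R : Int)) "") cw]) []))]) []
    = (pvZipLongest ((PySem.List.pyRange 0 (C : Int)).map
        (fun c => PySem.List.slice entries (some (c * (R : Int))) (some ((c + 1) * (R : Int))))) "").map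
        (fun row => PySem.Str.rstrip (PySem.Str.join "" (row.map (fun cell => pvLjust cell cw)))) := by
  simp only [PySem.List.pyRange_zero_natCast]
  have hcols : (List.map (fun k : Nat => (k : Int)) (List.range C)).map
        (fun c => PySem.List.slice entries (some (c * (R : Int))) (some ((c + 1) * (R : Int))))
      = (List.range C).map (fun k => List.take R (List.drop (k * R) entries)) := by
    rw [List.map_map]
    apply List.map_congr_left
    intro k _
    simp only [Function.comp_def]
    have h1 : (k : Int) * (R : Int) = ((k * R : Nat) : Int) := by push_cast; ring
    have h2 : ((k : Int) + 1) * (R : Int) = (((k + 1) * R : Nat) : Int) := by push_cast; ring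
    rw [h1, h2, PySem.List.slice_natCast]
    congr 1
    rw [Nat.succ_mul, Nat.add_sub_cancel_left]
  rw [hcols]
  have hlen : ((((List.range C).map (fun k => List.take R (List.drop (k * R) entries))).map
      List.length).foldl max 0) = R := by
    rw [List.map_map]
    apply pv_foldl_max_eq
    · refine List.mem_map.mpr ⟨0, List.mem_range.mpr (by omega), ?_⟩
      simp only [Function.comp_def]
      rw [List.length_take, List.length_drop]
      omega
    · intro x hx
      obtain ⟨k, _, rfl⟩ := List.mem_map.mp hx
      simp only [Function.comp_def]
      rw [List.length_take]
      exact Nat.min_le_left _ _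
  simp only [pvZipLongest]
  rw [hlen]
  rw [PySem.List.foldl_append_singleton_eq_map, List.nil_append]
  simp only [List.map_map, Function.comp_def]
  apply List.map_congr_left
  intro r hr
  exact pv_row entries cw C R r (List.mem_range.mp hr)

-- ===== VERDICT (by name: the statement is the Claim_ definition above) =====
theorem format_multi_column_py_spec : Claim_equal_format_multi_column_py := by
  intro entries max_width _
  unfold Spec_format_multi_column_py
  by_cases h : entries = []
  · subst h; rfl
  · have hL : 1 ≤ entries.length := List.length_pos_iff.mpr h
    simp only [format_multi_column_py, format_multi_column_py_alt, if_neg h]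
    generalize (PySem.List.max? (entries.map (fun entry => PySem.Str.len entry)) (fun x => x)).getD 0 + 2 = cw
    generalize hcol : max 1 (PySem.Int.floordiv max_width cw) = columns
    have hc1 : (1 : Int) ≤ columns := hcol ▸ le_max_left 1 _
    generalize hrow : PySem.Int.floordiv ((entries.length : Int) + columns - 1) columns = rows
    have hr1 : (1 : Int) ≤ rows := by
      rw [← hrow, PySem.Int.le_floordiv_iff_mul_le (by omega : (0 : Int) < columns)]
      omega
    have hrL : rows ≤ (entries.length : Int) := by
      have h2 : rows < (entries.length : Int) + 1 := by
        rw [← hrow, PySem.Int.floordiv_lt_iff_lt_mul (by omega : (0 : Int) < columns)]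
        have hmul : (entries.length : Int) * 1 ≤ (entries.length : Int) * columns :=
          mul_le_mul_of_nonneg_left hc1 (by positivity)
        nlinarith
      omega
    obtain ⟨C, rfl⟩ : ∃ C : Nat, columns = (C : Int) :=
      ⟨columns.toNat, (Int.toNat_of_nonneg (by omega)).symm⟩
    obtain ⟨R, rfl⟩ : ∃ R : Nat, rows = (R : Int) :=
      ⟨rows.toNat, (Int.toNat_of_nonneg (by omega)).symm⟩
    exact pv_core entries cw C R (by exact_mod_cast hc1) (by exact_mod_cast hr1)
      (by exact_mod_cast hrL)
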